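-- pv_equiv track=rewrite | github.com/sharath573/BioInformatics-Assignments | Homework/homework_1.py | reading_frames
-- ===== SOURCE A (Python) =====
-- def reading_frames(dna):
--     """
--     Generates a list of all 6 possible reading frames for a given strand of DNA
--     For the non-biologists: https://en.wikipedia.org/wiki/Open_reading_frame
--     :param dna: a string containing only the characters C, T, A, and G
--     :return: a list of 6 strings containing only C, T, A, and G
--     """
--     list = []
--     stra=''
--     strb=''
--     strc=''
--     a = dna[1:]
--     b = dna[2:]
--
--     list.append(dna)
--     for char in dna:
--         complement = {'A': 'T', 'T': 'A', 'C': 'G', 'G': 'C'}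
--         stra = stra + complement[char]
--     list.append(stra[::-1])
--     list.append(a)
--     for char in a:
--         complement = {'A': 'T', 'T': 'A', 'C': 'G', 'G': 'C'}
--         strb = strb + complement[char]
--     list.append(strb[::-1])
--     list.append(b)
--     for char in b:
--         complement = {'A': 'T', 'T': 'A', 'C': 'G', 'G': 'C'}
--         strc = strc + complement[char]
--     list.append(strc[::-1])
--
--     return list
-- ===== SOURCE B (Python) =====
-- def reading_frames(dna):
--     """
--     Generates a list of all 6 possible reading frames for a given strand of DNA
--     Computes the reverse complement of the whole strand once, then derives the
--     other reverse complements by slicing: revcomp(dna[1:]) == rc[:-1], etc.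
--     """
--     complement = {'A': 'T', 'T': 'A', 'C': 'G', 'G': 'C'}
--     rc = ''.join(complement[c] for c in dna)[::-1]
--     return [dna, rc, dna[1:], rc[:-1], dna[2:], rc[:-2]]
-- ===== Notes on version B (the rewrite author's own statement) =====
-- stated objective: simpler
-- what changed: B computes the reverse complement of the whole strand once and derives the other two reverse complements by slicing (rc[:-1], rc[:-2]), replacing A's three separate complement loops with one scan plus slices.
import Mathlib
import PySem

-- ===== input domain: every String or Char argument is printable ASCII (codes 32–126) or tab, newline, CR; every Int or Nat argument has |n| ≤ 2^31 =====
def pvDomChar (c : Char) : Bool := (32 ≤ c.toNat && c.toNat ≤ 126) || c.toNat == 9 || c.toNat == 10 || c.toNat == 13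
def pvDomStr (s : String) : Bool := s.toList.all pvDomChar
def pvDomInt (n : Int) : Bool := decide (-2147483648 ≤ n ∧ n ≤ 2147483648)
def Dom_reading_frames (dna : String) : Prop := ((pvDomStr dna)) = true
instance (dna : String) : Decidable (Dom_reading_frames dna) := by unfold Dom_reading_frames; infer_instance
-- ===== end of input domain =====

-- B computes the reverse complement of the whole strand once and derives the other two
-- reverse complements by slicing (rc[:-1], rc[:-2]) instead of A's three complement loops (objective: simpler).


-- ===== PORT A =====
-- the dict literal A rebuilds each iteration (always the same value)
def pvComplementA : PySem.Dict Char Char :=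
  PySem.Dict.ofList [('A', 'T'), ('T', 'A'), ('C', 'G'), ('G', 'C')]

def reading_frames (dna : String) : List String :=
  let l := dna.toList
  let a := PySem.List.slice l (some 1) none          -- dna[1:]
  let b := PySem.List.slice l (some 2) none          -- dna[2:]
  -- complement[char] raises KeyError off the four DNA bases; Pre_ excludes those inputs, so the getD default is never used
  let stra := l.foldl (fun acc c => acc ++ [PySem.Dict.getD pvComplementA c c]) []
  let strb := a.foldl (fun acc c => acc ++ [PySem.Dict.getD pvComplementA c c]) []
  let strc := b.foldl (fun acc c => acc ++ [PySem.Dict.getD pvComplementA c c]) []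
  [dna, String.ofList stra.reverse, String.ofList a, String.ofList strb.reverse, String.ofList b, String.ofList strc.reverse]

-- ===== PORT B =====
def reading_frames_alt (dna : String) : List String :=
  -- rc = ''.join(complement[c] for c in dna)[::-1]; KeyError off the four DNA bases is excluded by Pre_
  let rc := (dna.toList.map (fun c => PySem.Dict.getD pvComplementA c c)).reverse
  [dna, String.ofList rc,
   String.ofList (PySem.List.slice dna.toList (some 1) none),   -- dna[1:]
   String.ofList (PySem.List.slice rc none (some (-1))),        -- rc[:-1]
   String.ofList (PySem.List.slice dna.toList (some 2) none),   -- dna[2:]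
   String.ofList (PySem.List.slice rc none (some (-2)))]        -- rc[:-2]

-- ===== PRECONDITION & SPEC =====
-- Pre_ excludes exactly the strings with a character outside the four DNA bases, on which both Pythons raise KeyError.
def Pre_reading_frames (dna : String) : Prop :=
  (dna.toList.all (fun c => c == 'A' || c == 'T' || c == 'C' || c == 'G')) = true
instance (dna : String) : Decidable (Pre_reading_frames dna) := by unfold Pre_reading_frames; infer_instance

def pvWitness_reading_frames : String := "ACGT"

def Spec_reading_frames (dna : String) (out : List String) : Prop := out = reading_frames_alt dna
instance (dna : String) (out : List String) : Decidable (Spec_reading_frames dna out) := by unfold Spec_reading_frames; infer_instance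

-- ===== CLAIM (what is proved, stated in full; the proofs are below) =====
def Claim_equal_reading_frames : Prop := ∀ (dna : String), Dom_reading_frames dna → Pre_reading_frames dna → Spec_reading_frames dna (reading_frames dna)

-- ===== LEMMAS AND PROOFS =====
-- revcomp(drop k of l) is the first (len−k) chars of revcomp(l): push map under drop, then List.reverse_drop
theorem pv_rev_map_drop (l : List Char) (f : Char → Char) (k : Nat) :
    ((l.drop k).map f).reverse = ((l.map f).reverse).take (l.length - k) := by
  rw [List.map_drop, List.reverse_drop, List.length_map]

-- ===== VERDICT (by name: the statement is the Claim_ definition above) =====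
theorem reading_frames_spec : Claim_equal_reading_frames := by
  intro dna _ _
  unfold Spec_reading_frames reading_frames reading_frames_alt
  simp only [PySem.List.foldl_append_singleton_eq_map, List.nil_append]
  rw [PySem.List.slice_to_neg_one, PySem.List.slice_to_neg_ofNat _ 2 (by omega)]
  have h1 : PySem.List.slice dna.toList (some 1) none = dna.toList.drop 1 := by
    exact_mod_cast PySem.List.slice_from_natCast dna.toList 1
  have h2 : PySem.List.slice dna.toList (some 2) none = dna.toList.drop 2 := by
    exact_mod_cast PySem.List.slice_from_natCast dna.toList 2
  rw [h1, h2, pv_rev_map_drop, pv_rev_map_drop]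
  simp [List.dropLast_eq_take, pvComplementA, pvComplementA]
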